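/- GENERATED by mk_final_copies.py from the proof of the farm's unit `vorbis_decode_packet_rest.4e` (farm:vorbis_decode_packet_rest.4e.1: Lemmas.lean) as the
   re-elaboration sweep compiled it — do not edit. -/
import Asan.CheckWalk
import Vorbis.Spec.Units.vorbis_decode_packet_rest_4e

open X86 X86.User Asan Vorbis Vorbis.Spec Vorbis.Spec.vorbis_decode_packet_rest

set_option maxRecDepth 4000
set_option maxHeartbeats 4000000

namespace Vorbis.Spec.vorbis_decode_packet_rest_4e

/-- `cdqe ; lea rbx, [rsi + rax*2]` with `eax = offset < 2^31`: the address of `finalY[offset]`. -/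
theorem y_addr (y off : Nat) (ho : off < 2 ^ 31) (hy : y + 2 * off < 2 ^ 64) :
    (UInt64.ofNat y + Word.ofBV (BitVec.signExtend 64 (BitVec.ofNat 32 off)) * 2).toNat = y + 2 * off := by
  have e1 : (BitVec.ofNat 32 off).toNat = off := toNat_ofNat32 off (by omega)
  have e2 := toNat_sext32 (BitVec.ofNat 32 off) (by omega)
  have e3 : (2 : Word).toNat = 2 := rfl
  rw [UInt64.toNat_add, UInt64.toNat_mul, e2, e1, e3, UInt64.toNat_ofNat']
  omega

/-- `lea r13d, [rax + 1]` with `eax = offset`: `offset + 1`. -/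
theorem off_succ (off : Nat) (ho : off + 1 < 2 ^ 32) :
    (BitVec.setWidth 32 (Word.ofBV (BitVec.ofNat 32 off) + 1).toBitVec).toNat = off + 1 := by
  have e1 : (1 : Word).toNat = 1 := rfl
  rw [BitVec.toNat_setWidth, UInt64.toNat_toBitVec, UInt64.toNat_add, toNat_ofBV32, e1, toNat_ofNat32 off (by omega)]
  omega

/-- `add r14d, 1` with `r14 = k`: `k + 1`. -/
theorem k_succ (k : Nat) (hk : k + 1 < 2 ^ 32) :
    Word.ofBV (Word.part .w32 (UInt64.ofNat k) + 1#32) = UInt64.ofNat (k + 1) := by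
  apply UInt64.toNat_inj.mp
  have e1 : (1#32).toNat = 1 := rfl
  rw [toNat_ofBV32, BitVec.toNat_add, part32_toNat, e1, UInt64.toNat_ofNat', UInt64.toNat_ofNat']
  omega


/-- **Sub-segment E, PROVED**: 0x110ce2–0x110d06, `finalY[offset++] = temp` (the check: `offset < values`
by FL8 — `Floor1OK.offset_lt` —, `2·values ≤` the block's size by FY1), `++k`; the loop head again by `Loop4.step`. -/
theorem segE {Lay : Layout} (hLay : Lay.hi = 0x1000000) {μ : Microarch} (hμ : UserX.MicroOK μ) {u₀ : State}
    (hcode : HasCodeNat Lay u₀ Vorbis.L.vorbis_decode_packet_rest.entry Vorbis.Code.code_vorbis_decode_packet_rest.nat Vorbis.L.vorbis_decode_packet_rest.size)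
    (hs2 : Asan.SmallCheck Lay μ Vorbis.WayInv (Vorbis.CodeOK u₀) [.rax, .rcx, .rdx] 2 Vorbis.L.__asan_store2_noabort.entry) :
    Seg4e Lay μ u₀ := by
  intro others frames len Ar stored room mode ysz e ret i j k v hat
  have he := hat.entry
  v_entry he
  have w_rip := hat.rip
  have w_rsp : v.reg .rsp = e.reg .rsp - 3000 := hat.rsp
  have hrsp_v : v.reg .rsp = e.reg .rsp - 3000 := hat.rsp
  have w_eq : Mem.EqOn Vorbis.L.textLo Vorbis.L.textHi u₀.mem v.mem := hat.code
  have hdf : v.flags .df = false := (show abiInv _ from hat.abi).1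
  have hmx : v.mxcsr &&& 0x1F80 = 0x1F80 := (show abiInv _ from hat.abi).2
  have hsse := Vorbis.sseOK_of_abiInv hat.abi
  have hr14 : v.reg .r14 = UInt64.ofNat k := hat.r14
  obtain ⟨hsh, hinv0, hargs⟩ := hat.pre
  have hinv := hat.inv
  have hok := hinv.ok
  have hL := hinv.live
  have hi := hat.i_lt
  -- the floor, the offset, the finalY block
  obtain ⟨g, hg⟩ : ∃ g : Nat, slot64 e v 0x18 = g := ⟨_, rfl⟩
  have hgf : IsFloor v.mem (fOf e) g := by
    rw [← hg]
    exact hat.g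
  have hfl := hinv.config.floor.floor hgf
  obtain ⟨off, hoff⟩ : ∃ off : Nat, 2 + Floor1.dimSum v.mem g j + k = off := ⟨_, rfl⟩
  have a8 : e.reg .rsp - 3000 + 0x8 = e.reg .rsp - 2992 := by bv_decide
  have a20 : e.reg .rsp - 3000 + 0x20 = e.reg .rsp - 2968 := by bv_decide
  have hoffs : v.mem.readLE (e.reg .rsp - 2992) 4 = off := by
    rw [← a8, ← hoff, ← hg]
    exact hat.slot_offset
  obtain ⟨y, hy⟩ : ∃ y : Nat, stb_vorbis.finalY v.mem (fOf e) i = y := ⟨_, rfl⟩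
  have hys : v.mem.readLE (e.reg .rsp - 2968) 8 = y := by
    rw [← a20, ← hy]
    exact hat.slot_finalY
  -- `offset < values`, and the block holds `2·values` bytes (FL8, FY1)
  have hklt : k < Floor1.class_dimensions v.mem g (Floor1.partition_class_list v.mem g j) := by
    have h1 := hat.k_lt
    rw [hat.slot_cdim, hat.slot_pclass, hg] at h1
    exact h1
  have hjlt : j < Floor1.partitions v.mem g := by
    rw [← hg]
    exact hat.j_lt
  have hofflt := hfl.offset_lt hjlt hklt
  rw [hoff] at hofflt
  have hvb := hfl.values_bounds
  obtain ⟨hyb, hysz⟩ := hinv.fy i hi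
  rw [hy] at hyb
  have hysz' : 2 * Floor1.values v.mem g ≤ (ysz i : Int) := by
    obtain ⟨idx, hidx, rfl⟩ := hgf
    exact hysz idx hidx
  have hyins := hok.inside _ hyb
  have hyoff := hinv.offStack _ hyb
  simp only [vblock] at hyins
  simp only [] at hyoff
  have hywhere := (LiveBytes.of_block (a := y) (n := ysz i) (hL _ hyb) (Nat.le_refl _) (Nat.le_refl _)).where_
    hat.shadow hsh.offText (by omega) (by u_omega)
  have hya := y_addr y off (by omega) (by omega)
  have hfoff := hinv.objOff
  simp only [voff] at hfoff
  have hyobj := hinv.sep.bufobj _ (SampleBuf.finalY i hi (ysz i) (hy ▸ hyb))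
  rw [hy] at hyobj
  simp only [vblock, voff] at hyobj
  u_walk hcode [hμ.vendor] until [Vorbis.L.vorbis_decode_packet_rest.cut7] span [Vorbis.L.textLo, Vorbis.L.textHi] side (v_side)
  · -- 0x110cf8: store2 finalY + 2·offset
    have hun : ShadowUntouched v.mem s_110cf8.mem := by v_untouched
    have hs : Site (LiveSet others (framesIn frames e)) (y + 2 * off) 2 :=
      Site.of_blk hL hyb (by simp only []; omega) (by simp only []; omega) (by omega)
    exact check_site hat.shadow hun hs hya
  · -- the back edge: the loop head with `k + 1`
    refine ReachVia.done ?_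
    have hsame : Mem.SameExcept [⟨(e.reg .rsp).toNat - 3856, (e.reg .rsp).toNat - 3000 + 12⟩,
        ⟨fOf e + 48, fOf e + 56⟩, ⟨fOf e + 84, fOf e + 96⟩, ⟨fOf e + 136, fOf e + 144⟩, ⟨fOf e + 1484, fOf e + 1749⟩,
        ⟨fOf e + 1752, fOf e + 1784⟩, ⟨y, y + ysz i⟩] v.mem s_110d06.mem := by
      u_same
    have hsame2 : Mem.SameExcept [⟨(e.reg .rsp).toNat - 3856, (e.reg .rsp).toNat - 3000 + 12⟩, ⟨y, y + ysz i⟩]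
        v.mem s_110d06.mem := by
      u_same
    have hb : Bits (RunBlk Ar len) len s_110d06.mem (fOf e) := by
      apply hinv.fb.vorbis.bits.frame_fields
      apply Bits.SameFields.of_sameExcept hsame2
      all_goals
        intro w hw
        simp only [List.mem_cons, List.mem_nil_iff, or_false] at hw
        rcases hw with rfl | rfl <;> simp only [] <;> omega
    have hoff' : slot32 e s_110d06 0x8 = 2 + Floor1.dimSum v.mem (slot64 e v 0x18) j + (k + 1) := by
      rw [hg, ← Nat.add_assoc, hoff]
      show s_110d06.mem.readLE (e.reg .rsp - 3000 + 0x8) 4 = off + 1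
      rw [a8, w_mem, Mem.readLE_writeLE_same _ _ _ _ (by omega), off_succ off (by omega)]
      omega
    refine ⟨?_, w_rip⟩
    apply hat.toLoop4.step he_room he_top w_rsp w_eq ?_ ?_ ?_ ?_ (hy ▸ hsame) hoff' hb
    · show (Vorbis.conv u₀).inv _
      v_inv
    · rw [w_kept.get .rbp rfl]
      exact hat.rbp
    · rw [w_r14]
      exact k_succ k (by have := hat.toLoop4.cdim_le; have := hat.k_lt; omega)
    · exact hat.k_lt

end Vorbis.Spec.vorbis_decode_packet_rest_4e
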